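-- pv_equiv track=rewrite | github.com/Oleksandr190378/SoftServe_Internship | ai-ml-course-assistant/ingest/extract_image_context.py | _extract_sentence_from_end
-- ===== SOURCE A (Python) =====
-- SENTENCE_MARKER_LENGTH = 2              # characters - length of ". " marker
--
-- SENTENCE_END_MARKERS = ['. ', '.\n', '! ', '!\n', '? ', '?\n']
--
-- def _extract_sentence_from_end(text: str, max_chars: int) -> str:
--     """
--
--     Extract sentence from end of text up to max_chars.
--
--     Args:
--         text: Source text
--         max_chars: Maximum characters to consider
--
--     Returns:
--         Extracted text ending with sentence boundary
--     """
--     if not text or max_chars < 1: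
--         return ""
--
--     chunk = text[-max_chars:] if len(text) > max_chars else text
--
--     last_boundary = -1
--     for end_marker in SENTENCE_END_MARKERS:
--         idx = chunk.rfind(end_marker)
--         if idx > last_boundary:
--             last_boundary = idx
--
--     if last_boundary != -1:
--         return chunk[last_boundary + SENTENCE_MARKER_LENGTH:].strip()
--
--     return chunk.strip()
-- ===== SOURCE B (Python) =====
-- SENTENCE_MARKER_LENGTH = 2              # characters - length of ". " marker
--
-- SENTENCE_END_MARKERS = ['. ', '.\n', '! ', '!\n', '? ', '?\n']
--
-- def _extract_sentence_from_end(text: str, max_chars: int) -> str: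
--     # One backward scan over the chunk instead of six rfind passes:
--     # return at the rightmost two-char end marker.
--     if not text or max_chars < 1:
--         return ""
--     chunk = text[-max_chars:] if len(text) > max_chars else text
--     for i in range(len(chunk) - 2, -1, -1):
--         if chunk[i:i+2] in SENTENCE_END_MARKERS:
--             return chunk[i+2:].strip()
--     return chunk.strip()
-- ===== Notes on version B (the rewrite author's own statement) =====
-- stated objective: alternative
-- what changed: Replaced the six full rfind passes plus a running max-of-indices with a single backward scan over the chunk that returns at the rightmost two-character end marker (early exit), falling back to chunk.strip() if no marker is found.
import Mathlib
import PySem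

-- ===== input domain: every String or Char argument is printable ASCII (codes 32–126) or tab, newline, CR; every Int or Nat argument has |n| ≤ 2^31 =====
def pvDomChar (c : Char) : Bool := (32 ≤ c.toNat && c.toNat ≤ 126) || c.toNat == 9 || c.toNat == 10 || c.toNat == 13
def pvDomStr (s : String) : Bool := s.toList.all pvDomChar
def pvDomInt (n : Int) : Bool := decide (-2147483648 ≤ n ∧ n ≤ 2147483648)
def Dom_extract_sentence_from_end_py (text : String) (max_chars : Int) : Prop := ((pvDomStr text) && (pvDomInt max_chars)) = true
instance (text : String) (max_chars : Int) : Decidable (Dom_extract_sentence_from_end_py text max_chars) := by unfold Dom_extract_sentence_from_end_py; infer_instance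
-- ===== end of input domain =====

-- B replaces A's six rfind passes + max-of-indices with ONE backward scan of the chunk
-- that stops at the rightmost two-char end marker (objective: alternative algorithm).

-- ===== PORT A =====
def SENTENCE_END_MARKERS : List (List Char) :=
  [['.', ' '], ['.', '\n'], ['!', ' '], ['!', '\n'], ['?', ' '], ['?', '\n']]

def extract_sentence_from_end_py (text : String) (max_chars : Int) : String :=
  if text.toList = [] ∨ max_chars < 1 then "" else
  let chunk : List Char :=
    if (text.toList.length : Int) > max_chars then
      PySem.List.slice text.toList (some (-max_chars)) none
    else text.toList
  let last_boundary : Int :=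
    SENTENCE_END_MARKERS.foldl
      (fun lb m =>
        let idx := PySem.Chars.rfind chunk m
        if idx > lb then idx else lb) (-1)
  if last_boundary ≠ -1 then
    String.ofList (PySem.Chars.strip (PySem.List.slice chunk (some (last_boundary + 2)) none))
  else
    String.ofList (PySem.Chars.strip chunk)

-- ===== PORT B =====
-- the for-loop of Source B: i runs from len(chunk)-2 down to 0
def altScanAux (chunk : List Char) : Nat → List Char
  | 0 =>
    if PySem.List.slice chunk (some ((0 : Nat) : Int)) (some (((0 : Nat) : Int) + 2)) ∈ SENTENCE_END_MARKERS then
      PySem.Chars.strip (PySem.List.slice chunk (some (((0 : Nat) : Int) + 2)) none)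
    else
      PySem.Chars.strip chunk
  | j + 1 =>
    if PySem.List.slice chunk (some ((j + 1 : Nat) : Int)) (some (((j + 1 : Nat) : Int) + 2)) ∈ SENTENCE_END_MARKERS then
      PySem.Chars.strip (PySem.List.slice chunk (some (((j + 1 : Nat) : Int) + 2)) none)
    else
      altScanAux chunk j

def extract_sentence_from_end_py_alt (text : String) (max_chars : Int) : String :=
  if text.toList = [] ∨ max_chars < 1 then "" else
  let chunk : List Char :=
    if (text.toList.length : Int) > max_chars then
      PySem.List.slice text.toList (some (-max_chars)) none
    else text.toList
  if chunk.length < 2 then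
    String.ofList (PySem.Chars.strip chunk)
  else
    String.ofList (altScanAux chunk (chunk.length - 2))

-- ===== PRECONDITION & SPEC =====
def Spec_extract_sentence_from_end_py (text : String) (max_chars : Int) (out : String) : Prop := out = extract_sentence_from_end_py_alt text max_chars
instance (text : String) (max_chars : Int) (out : String) : Decidable (Spec_extract_sentence_from_end_py text max_chars out) := by unfold Spec_extract_sentence_from_end_py; infer_instance

-- ===== CLAIM (what is proved, stated in full; the proofs are below) =====
def Claim_equal_extract_sentence_from_end_py : Prop := ∀ (text : String) (max_chars : Int), Dom_extract_sentence_from_end_py text max_chars → Spec_extract_sentence_from_end_py text max_chars (extract_sentence_from_end_py text max_chars)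

-- ===== LEMMAS AND PROOFS =====

-- "some end marker starts at position i of chunk"
def testP (chunk : List Char) (i : Nat) : Prop :=
  ∃ m ∈ SENTENCE_END_MARKERS, m <+: chunk.drop i

-- A's max-of-rfind fold, with the rfind scan cut at bound j
def goM (chunk : List Char) (j : Nat) : Int :=
  SENTENCE_END_MARKERS.foldl
    (fun lb m =>
      if PySem.Chars.rfind.go chunk m j > lb then PySem.Chars.rfind.go chunk m j else lb) (-1)

theorem go_zero (s m : List Char) :
    PySem.Chars.rfind.go s m 0 = if m.isPrefixOf s then 0 else -1 := rfl

theorem go_succ (s m : List Char) (j : Nat) :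
    PySem.Chars.rfind.go s m (j + 1) =
      if m.isPrefixOf (s.drop (j + 1)) then ((j : Int) + 1) else PySem.Chars.rfind.go s m j := by
  show (if m.isPrefixOf (s.drop (j + 1)) then ((j + 1 : Nat) : Int) else PySem.Chars.rfind.go s m j) = _
  push_cast; rfl

theorem go_le (s m : List Char) (j : Nat) : PySem.Chars.rfind.go s m j ≤ (j : Int) := by
  induction j with
  | zero => rw [go_zero]; split <;> omega
  | succ k ih => rw [go_succ]; split <;> [omega; exact le_trans ih (by omega)]

theorem foldA_ge_init (f : List Char → Int) (ms : List (List Char)) (a : Int) :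
    a ≤ ms.foldl (fun lb m => if f m > lb then f m else lb) a := by
  induction ms generalizing a with
  | nil => simp
  | cons x xs ih =>
      simp only [List.foldl_cons]
      exact le_trans (by split <;> omega) (ih _)

theorem foldA_le (f : List Char → Int) (ms : List (List Char)) (a c : Int)
    (h : ∀ m ∈ ms, f m ≤ c) (ha : a ≤ c) :
    ms.foldl (fun lb m => if f m > lb then f m else lb) a ≤ c := by
  induction ms generalizing a with
  | nil => simpa
  | cons x xs ih =>
      simp only [List.foldl_cons]
      refine ih _ (fun m hm => h m (List.mem_cons_of_mem _ hm)) ?_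
      have := h x (List.mem_cons_self ..)
      split <;> omega

theorem foldA_ge_elem (f : List Char → Int) (ms : List (List Char)) (a : Int) (m : List Char)
    (hm : m ∈ ms) :
    f m ≤ ms.foldl (fun lb m => if f m > lb then f m else lb) a := by
  induction ms generalizing a with
  | nil => cases hm
  | cons x xs ih =>
      simp only [List.foldl_cons]
      rcases List.mem_cons.mp hm with rfl | hm'
      · exact le_trans (by split <;> omega) (foldA_ge_init ..)
      · exact ih _ hm'

theorem foldA_congr (f g : List Char → Int) (ms : List (List Char)) (a : Int)
    (h : ∀ m ∈ ms, f m = g m) :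
    ms.foldl (fun lb m => if f m > lb then f m else lb) a
      = ms.foldl (fun lb m => if g m > lb then g m else lb) a := by
  induction ms generalizing a with
  | nil => rfl
  | cons x xs ih =>
      simp only [List.foldl_cons, h x (List.mem_cons_self ..)]
      exact ih _ (fun m hm => h m (List.mem_cons_of_mem _ hm))

theorem neg_one_le_goM (chunk : List Char) (j : Nat) : -1 ≤ goM chunk j :=
  foldA_ge_init ..

theorem goM_zero_pos (chunk : List Char) (h : testP chunk 0) :
    goM chunk 0 = 0 := by
  · obtain ⟨m, hm, hp⟩ := h
    refine le_antisymm (foldA_le _ _ _ _ (fun m' _ => by simpa using go_le chunk m' 0) (by omega)) ?_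
    have : PySem.Chars.rfind.go chunk m 0 = 0 := by
      rw [go_zero, if_pos (List.isPrefixOf_iff_prefix.mpr (by simpa using hp))]
    exact this ▸ foldA_ge_elem _ _ _ m hm

theorem goM_zero_neg (chunk : List Char) (h : ¬ testP chunk 0) :
    goM chunk 0 = -1 := by
  · have hall : ∀ m ∈ SENTENCE_END_MARKERS, PySem.Chars.rfind.go chunk m 0 = -1 := by
      intro m hm
      rw [go_zero, if_neg]
      intro hp
      exact h ⟨m, hm, by simpa using List.isPrefixOf_iff_prefix.mp hp⟩
    refine le_antisymm ?_ (neg_one_le_goM ..)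
    exact foldA_le _ _ _ _ (fun m hm => le_of_eq (hall m hm)) le_rfl

theorem goM_succ_pos (chunk : List Char) (j : Nat) (h : testP chunk (j + 1)) :
    goM chunk (j + 1) = (j : Int) + 1 := by
  · obtain ⟨m, hm, hp⟩ := h
    refine le_antisymm
      (foldA_le _ _ _ _ (fun m' _ => by simpa [Int.natCast_succ] using go_le chunk m' (j+1)) (by omega)) ?_
    have : PySem.Chars.rfind.go chunk m (j + 1) = (j : Int) + 1 := by
      rw [go_succ, if_pos (List.isPrefixOf_iff_prefix.mpr hp)]
    exact this ▸ foldA_ge_elem _ _ _ m hm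

theorem goM_succ_neg (chunk : List Char) (j : Nat) (h : ¬ testP chunk (j + 1)) :
    goM chunk (j + 1) = goM chunk j := by
  · refine foldA_congr _ _ _ _ (fun m hm => ?_)
    rw [go_succ, if_neg]
    intro hp
    exact h ⟨m, hm, List.isPrefixOf_iff_prefix.mp hp⟩

theorem marker_len {m : List Char} (hm : m ∈ SENTENCE_END_MARKERS) : m.length = 2 := by
  fin_cases hm <;> rfl

theorem window_mem_iff (chunk : List Char) (i : Nat) :
    (PySem.List.slice chunk (some (i : Int)) (some ((i : Int) + 2)) ∈ SENTENCE_END_MARKERS)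
      ↔ testP chunk i := by
  have hs : PySem.List.slice chunk (some (i : Int)) (some ((i : Int) + 2))
      = (chunk.drop i).take 2 := by
    have := PySem.List.slice_natCast_add chunk i 2
    simpa using this
  rw [hs]
  constructor
  · intro hmem
    refine ⟨_, hmem, ?_⟩
    exact List.take_prefix _ _
  · rintro ⟨m, hm, hp⟩
    have : (chunk.drop i).take 2 = m := by
      have := List.prefix_iff_eq_take.mp hp
      rw [this, marker_len hm]
    rwa [this]

theorem testP_of_short (chunk : List Char) (i : Nat) (h : chunk.length < i + 2) :
    ¬ testP chunk i := by
  rintro ⟨m, hm, hp⟩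
  have := hp.length_le
  rw [marker_len hm, List.length_drop] at this
  omega

theorem altScanAux_eq (chunk : List Char) (j : Nat) :
    altScanAux chunk j =
      if goM chunk j = -1 then PySem.Chars.strip chunk
      else PySem.Chars.strip (chunk.drop ((goM chunk j).toNat + 2)) := by
  induction j with
  | zero =>
      simp only [altScanAux]
      by_cases h : testP chunk 0
      · rw [if_pos ((window_mem_iff chunk 0).mpr h), goM_zero_pos chunk h]
        norm_num
        rw [PySem.List.slice_from _ (by omega : (0:Int) ≤ 2)]
        rfl
      · rw [if_neg (fun hc => h ((window_mem_iff chunk 0).mp hc)), goM_zero_neg chunk h, if_pos rfl]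
  | succ k ih =>
      simp only [altScanAux]
      by_cases h : testP chunk (k + 1)
      · rw [if_pos ((window_mem_iff chunk (k+1)).mpr h), goM_succ_pos chunk k h,
          if_neg (by omega : ¬ ((k : Int) + 1 = -1))]
        rw [PySem.List.slice_from _ (by positivity)]
        congr 2
      · rw [if_neg (fun hc => h ((window_mem_iff chunk (k+1)).mp hc)), goM_succ_neg chunk k h]
        exact ih

theorem goM_len (chunk : List Char) :
    goM chunk chunk.length = if chunk.length < 2 then -1 else goM chunk (chunk.length - 2) := by
  by_cases h2 : chunk.length < 2
  · rw [if_pos h2]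
    interval_cases h : chunk.length
    · exact goM_zero_neg chunk (testP_of_short chunk 0 (by omega))
    · rw [show (1:Nat) = 0 + 1 from rfl, goM_succ_neg chunk 0 (testP_of_short chunk 1 (by omega))]
      exact goM_zero_neg chunk (testP_of_short chunk 0 (by omega))
  · rw [if_neg h2]
    obtain ⟨k, hk⟩ : ∃ k, chunk.length = k + 2 := ⟨chunk.length - 2, by omega⟩
    rw [hk]
    show goM chunk (k + 1 + 1) = goM chunk (k + 2 - 2)
    rw [goM_succ_neg chunk (k+1) (testP_of_short chunk (k+1+1) (by omega)),
      goM_succ_neg chunk k (testP_of_short chunk (k+1) (by omega))]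
    rfl

theorem main_chunk (chunk : List Char) :
    (let last_boundary : Int :=
      SENTENCE_END_MARKERS.foldl
        (fun lb m =>
          let idx := PySem.Chars.rfind chunk m
          if idx > lb then idx else lb) (-1)
     if last_boundary ≠ -1 then
       String.ofList (PySem.Chars.strip (PySem.List.slice chunk (some (last_boundary + 2)) none))
     else String.ofList (PySem.Chars.strip chunk))
    = (if chunk.length < 2 then String.ofList (PySem.Chars.strip chunk)
       else String.ofList (altScanAux chunk (chunk.length - 2))) := by
  have hfold :
      SENTENCE_END_MARKERS.foldl
        (fun lb m =>
          let idx := PySem.Chars.rfind chunk m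
          if idx > lb then idx else lb) (-1) = goM chunk chunk.length := rfl
  simp only [hfold]
  by_cases h2 : chunk.length < 2
  · rw [if_pos h2]
    have : goM chunk chunk.length = -1 := by rw [goM_len, if_pos h2]
    rw [this]
    simp
  · rw [if_neg h2, altScanAux_eq]
    have hlen : goM chunk chunk.length = goM chunk (chunk.length - 2) := by
      rw [goM_len, if_neg h2]
    rw [hlen]
    by_cases hneg : goM chunk (chunk.length - 2) = -1
    · rw [hneg]; simp
    · have hge : 0 ≤ goM chunk (chunk.length - 2) := by
        have := neg_one_le_goM chunk (chunk.length - 2); omega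
      rw [if_neg hneg, if_pos hneg]
      have : PySem.List.slice chunk (some (goM chunk (chunk.length - 2) + 2)) none
          = chunk.drop ((goM chunk (chunk.length - 2)).toNat + 2) := by
        rw [PySem.List.slice_from _ (by omega)]
        congr 1
        omega
      rw [this]

-- ===== VERDICT (by name: the statement is the Claim_ definition above) =====
theorem extract_sentence_from_end_py_spec : Claim_equal_extract_sentence_from_end_py := by
  intro text max_chars _
  unfold Spec_extract_sentence_from_end_py extract_sentence_from_end_py extract_sentence_from_end_py_alt
  by_cases hg : text.toList = [] ∨ max_chars < 1
  · rw [if_pos hg, if_pos hg]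
  · rw [if_neg hg, if_neg hg]
    exact main_chunk _
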